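-- pv_equiv track=rewrite | github.com/XPTOOLS/XP-Tools-Bot | bot/modules/token.py | extract_price_data_from_caption
-- ===== SOURCE A (Python) =====
-- def extract_price_data_from_caption(caption):
--     if not caption:
--         return None
--     lines = caption.split('\n')
--     price_data = {}
--     for line in lines:
--         if 'Last Price:' in line:
--             parts = line.split('Last Price:</b> ')
--             price_data['lastPrice'] = parts[1].strip() if len(parts) > 1 else ""
--         elif 'Change:' in line:
--             parts = line.split('Change:</b> ')
--             price_data['priceChangePercent'] = parts[1].strip() if len(parts) > 1 else ""
--         elif '24h High:' in line:
--             parts = line.split('24h High:</b> ')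
--             price_data['highPrice'] = parts[1].strip() if len(parts) > 1 else ""
--         elif '24h Low:' in line:
--             parts = line.split('24h Low:</b> ')
--             price_data['lowPrice'] = parts[1].strip() if len(parts) > 1 else ""
--         elif '24h Volume:' in line and '24h Quote Volume:' not in line:
--             parts = line.split('24h Volume:</b> ')
--             price_data['volume'] = parts[1].strip() if len(parts) > 1 else ""
--         elif '24h Quote Volume:' in line:
--             parts = line.split('24h Quote Volume:</b> ')
--             price_data['quoteVolume'] = parts[1].strip() if len(parts) > 1 else ""
--     return price_data
-- ===== SOURCE B (Python) =====
-- # B: staged group-by instead of an incremental per-line dict update: classify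
-- # every line once, build a last-occurrence index of the classified keys in one
-- # pass, then emit keys in first-occurrence order, parsing only the winning line
-- # (one split/strip per key instead of per matching line).
-- _RULES = [
--     ('Last Price:', 'Last Price:</b> ', 'lastPrice'),
--     ('Change:', 'Change:</b> ', 'priceChangePercent'),
--     ('24h High:', '24h High:</b> ', 'highPrice'),
--     ('24h Low:', '24h Low:</b> ', 'lowPrice'),
--     ('24h Quote Volume:', '24h Quote Volume:</b> ', 'quoteVolume'),
--     ('24h Volume:', '24h Volume:</b> ', 'volume'),
-- ]
--
--
-- def _classify(line):
--     """First rule whose marker occurs in the line (quote-volume listed before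
--     volume, so rule order encodes the exclusion)."""
--     for detect, sep, key in _RULES:
--         if detect in line:
--             return key, sep
--     return None
--
--
-- def extract_price_data_from_caption(caption):
--     if not caption:
--         return None
--     lines = caption.split('\n')
--     tags = [_classify(l) for l in lines]
--     last = {}
--     for i, t in enumerate(tags):
--         if t is not None:
--             last[t[0]] = i
--     result = {}
--     for t in tags:
--         if t is None or t[0] in result:
--             continue
--         parts = lines[last[t[0]]].split(t[1])
--         result[t[0]] = parts[1].strip() if len(parts) > 1 else ""
--     return result
-- ===== Notes on version B (the rewrite author's own statement) =====
-- stated objective: alternative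
-- what changed: Replaces A's single per-line elif-chain that updates the dict incrementally by a staged group-by: one classification pass tagging every line, one pass building a last-occurrence index dict, then one output pass that inserts each key once (first-occurrence order) and splits/strips only the last line carrying that key.
import Mathlib
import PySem

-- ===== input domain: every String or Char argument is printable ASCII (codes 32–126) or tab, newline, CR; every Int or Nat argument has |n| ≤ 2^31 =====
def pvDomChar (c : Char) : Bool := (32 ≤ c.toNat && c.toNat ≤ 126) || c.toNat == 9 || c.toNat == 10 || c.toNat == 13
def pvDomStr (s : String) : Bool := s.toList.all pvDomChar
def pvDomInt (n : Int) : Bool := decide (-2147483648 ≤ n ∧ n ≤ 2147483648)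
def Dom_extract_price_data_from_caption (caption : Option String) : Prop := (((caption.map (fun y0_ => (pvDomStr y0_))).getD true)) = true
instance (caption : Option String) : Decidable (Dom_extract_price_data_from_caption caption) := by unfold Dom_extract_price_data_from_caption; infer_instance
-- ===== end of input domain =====

-- B replaces A's per-line elif-chain dict updates by a staged group-by (classify pass,
-- last-occurrence index dict, one parse per key); alternative decomposition, same cost.


-- ===== PORT A =====
-- helper: one line of A's elif chain (literal transliteration of the loop body)
def pvALine (d : PySem.Dict String String) (line : String) : PySem.Dict String String :=
  if PySem.Str.isIn "Last Price:" line then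
    let parts := (PySem.Str.split? line "Last Price:</b> ").getD []
    d.insert "lastPrice" (if parts.length > 1 then PySem.Str.strip ((PySem.List.pyGet? parts 1).getD "") else "")
  else if PySem.Str.isIn "Change:" line then
    let parts := (PySem.Str.split? line "Change:</b> ").getD []
    d.insert "priceChangePercent" (if parts.length > 1 then PySem.Str.strip ((PySem.List.pyGet? parts 1).getD "") else "")
  else if PySem.Str.isIn "24h High:" line then
    let parts := (PySem.Str.split? line "24h High:</b> ").getD []
    d.insert "highPrice" (if parts.length > 1 then PySem.Str.strip ((PySem.List.pyGet? parts 1).getD "") else "")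
  else if PySem.Str.isIn "24h Low:" line then
    let parts := (PySem.Str.split? line "24h Low:</b> ").getD []
    d.insert "lowPrice" (if parts.length > 1 then PySem.Str.strip ((PySem.List.pyGet? parts 1).getD "") else "")
  else if PySem.Str.isIn "24h Volume:" line && !(PySem.Str.isIn "24h Quote Volume:" line) then
    let parts := (PySem.Str.split? line "24h Volume:</b> ").getD []
    d.insert "volume" (if parts.length > 1 then PySem.Str.strip ((PySem.List.pyGet? parts 1).getD "") else "")
  else if PySem.Str.isIn "24h Quote Volume:" line then
    let parts := (PySem.Str.split? line "24h Quote Volume:</b> ").getD []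
    d.insert "quoteVolume" (if parts.length > 1 then PySem.Str.strip ((PySem.List.pyGet? parts 1).getD "") else "")
  else d

def extract_price_data_from_caption (caption : Option String) : Option (List (String × String)) :=
  match caption with
  | none => none
  | some c =>
    if c = "" then none
    else
      let lines := (PySem.Str.split? c "\n").getD []
      some ((lines.foldl pvALine PySem.Dict.empty).items)

-- ===== PORT B =====
-- B's marker table (quote-volume before volume: rule order encodes A's exclusion)
def pvRules : List (String × String × String) :=
  [("Last Price:", "Last Price:</b> ", "lastPrice"),
   ("Change:", "Change:</b> ", "priceChangePercent"),
   ("24h High:", "24h High:</b> ", "highPrice"),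
   ("24h Low:", "24h Low:</b> ", "lowPrice"),
   ("24h Quote Volume:", "24h Quote Volume:</b> ", "quoteVolume"),
   ("24h Volume:", "24h Volume:</b> ", "volume")]

-- _classify: first rule whose marker occurs in the line
def pvClassify : List (String × String × String) → String → Option (String × String)
  | [], _ => none
  | (detect, sep, key) :: rest, line =>
    if PySem.Str.isIn detect line then some (key, sep) else pvClassify rest line

-- 'for i, t in enumerate(tags): if t is not None: last[t[0]] = i'
def pvLastDict (tags : List (Option (String × String))) : PySem.Dict String Int :=
  (PySem.List.enumerate tags).foldl
    (fun d p => match p.2 with | none => d | some q => d.insert q.1 p.1) PySem.Dict.empty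

-- body of B's output loop ('continue' on None / already-present keys; 'last[t[0]]'
-- is always present when reached, so the total getD 0 lookup is exact there)
def pvBStep (lines : List String) (last : PySem.Dict String Int)
    (d : PySem.Dict String String) (t : Option (String × String)) : PySem.Dict String String :=
  match t with
  | none => d
  | some (k, s) =>
    if d.contains k then d
    else
      let parts := (PySem.Str.split? (PySem.List.pyGetD lines (last.getD k 0) "") s).getD []
      d.insert k (if parts.length > 1 then PySem.Str.strip ((PySem.List.pyGet? parts 1).getD "") else "")

def extract_price_data_from_caption_alt (caption : Option String) : Option (List (String × String)) :=
  match caption with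
  | none => none
  | some c =>
    if c = "" then none
    else
      let lines := (PySem.Str.split? c "\n").getD []
      let tags := lines.map (pvClassify pvRules)
      some ((tags.foldl (pvBStep lines (pvLastDict tags)) PySem.Dict.empty).items)

-- ===== PRECONDITION & SPEC =====
def Spec_extract_price_data_from_caption (caption : Option String) (out : Option (List (String × String))) : Prop := out = extract_price_data_from_caption_alt caption
instance (caption : Option String) (out : Option (List (String × String))) : Decidable (Spec_extract_price_data_from_caption caption out) := by unfold Spec_extract_price_data_from_caption; infer_instance

-- ===== CLAIM =====
def Claim_equal_extract_price_data_from_caption : Prop := ∀ (caption : Option String), Dom_extract_price_data_from_caption caption → Spec_extract_price_data_from_caption caption (extract_price_data_from_caption caption)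

-- ===== LEMMAS AND PROOFS =====
-- proof-side abbreviations
def pvTag (l : String) : Option (String × String) := pvClassify pvRules l

def pvParse (line sep : String) : String :=
  let parts := (PySem.Str.split? line sep).getD []
  if parts.length > 1 then PySem.Str.strip ((PySem.List.pyGet? parts 1).getD "") else ""

def pvSepOf (k : String) : String :=
  if k = "lastPrice" then "Last Price:</b> "
  else if k = "priceChangePercent" then "Change:</b> "
  else if k = "highPrice" then "24h High:</b> "
  else if k = "lowPrice" then "24h Low:</b> "
  else if k = "quoteVolume" then "24h Quote Volume:</b> "
  else "24h Volume:</b> "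

-- A's loop body, in tag/parse form
def pvStepC (d : PySem.Dict String String) (l : String) : PySem.Dict String String :=
  match pvTag l with
  | none => d
  | some q => d.insert q.1 (pvParse l q.2)

-- keys produced by either fold, as a function of the tag list
def pvSeen (seen : List String) (ts : List (Option (String × String))) : List String :=
  ts.foldl (fun s t => match t with | none => s | some q => if q.1 ∈ s then s else s ++ [q.1]) seen

def keysOf (ts : List (Option (String × String))) : List String :=
  ts.filterMap (fun t => t.map Prod.fst)

def pvLastValFrom (v0 : String) (ls : List String) (k : String) : String :=
  ls.foldl (fun acc l => match pvTag l with
    | some q => if q.1 = k then pvParse l q.2 else acc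
    | none => acc) v0
theorem pvLastValFrom_cons (v0 l : String) (ls : List String) (k : String) :
    pvLastValFrom v0 (l :: ls) k =
      pvLastValFrom (match pvTag l with
        | some q => if q.1 = k then pvParse l q.2 else v0
        | none => v0) ls k := rfl

theorem pvSeen_cons (seen : List String) (t : Option (String × String)) (ts : List (Option (String × String))) :
    pvSeen seen (t :: ts) =
      pvSeen (match t with | none => seen | some q => if q.1 ∈ seen then seen else seen ++ [q.1]) ts := rfl

set_option maxHeartbeats 1000000 in
theorem pvALine_eq (d : PySem.Dict String String) (l : String) : pvALine d l = pvStepC d l := by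
  simp only [pvALine, pvStepC, pvTag, pvClassify, pvRules, pvParse]
  by_cases h1 : PySem.Str.isIn "Last Price:" l = true <;>
  by_cases h2 : PySem.Str.isIn "Change:" l = true <;>
  by_cases h3 : PySem.Str.isIn "24h High:" l = true <;>
  by_cases h4 : PySem.Str.isIn "24h Low:" l = true <;>
  by_cases hQ : PySem.Str.isIn "24h Quote Volume:" l = true <;>
  by_cases hV : PySem.Str.isIn "24h Volume:" l = true <;>
    simp only [h1, h2, h3, h4, hQ, hV, Bool.not_true, Bool.not_false, Bool.and_true,
      Bool.and_false, if_true, if_false, Bool.false_eq_true]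

theorem pvTag_sep (l : String) (q : String × String) (h : pvTag l = some q) : q.2 = pvSepOf q.1 := by
  simp only [pvTag, pvClassify, pvRules] at h
  split_ifs at h <;> (cases h; decide)

theorem pvGetD_foldC (ls : List String) (d : PySem.Dict String String) (k : String) :
    (ls.foldl pvStepC d).getD k "" = pvLastValFrom (d.getD k "") ls k := by
  induction ls generalizing d with
  | nil => rfl
  | cons l ls ih =>
    rw [List.foldl_cons, pvLastValFrom_cons]
    cases hc : pvTag l with
    | none => simp only [pvStepC, hc]; exact ih d
    | some q =>
      obtain ⟨k', s⟩ := q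
      simp only [pvStepC, hc]
      rw [ih, PySem.Dict.getD_insert]
      by_cases he : k = k'
      · simp [he]
      · simp [if_neg he, if_neg (Ne.symm he)]

theorem pvKeys_foldC (ls : List String) (d : PySem.Dict String String) :
    (ls.foldl pvStepC d).keys = pvSeen d.keys (ls.map pvTag) := by
  induction ls generalizing d with
  | nil => rfl
  | cons l ls ih =>
    rw [List.foldl_cons, List.map_cons, pvSeen_cons]
    cases hc : pvTag l with
    | none => simp only [pvStepC, hc]; exact ih d
    | some q =>
      simp only [pvStepC, hc]
      rw [ih]
      by_cases hm : q.1 ∈ d.keys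
      · rw [PySem.Dict.keys_insert_of_contains _ _ (by simpa [PySem.Dict.contains_iff_mem_keys] using hm), if_pos hm]
      · rw [PySem.Dict.keys_insert_of_not_contains _ _ (by simp [PySem.Dict.contains_eq_decide_mem_keys, hm]), if_neg hm]

theorem pvKeys_foldB (ts : List (Option (String × String))) (d : PySem.Dict String String)
    (lines : List String) (last : PySem.Dict String Int) :
    (ts.foldl (pvBStep lines last) d).keys = pvSeen d.keys ts := by
  induction ts generalizing d with
  | nil => rfl
  | cons t ts ih =>
    rw [List.foldl_cons, pvSeen_cons]
    cases t with
    | none => exact ih d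
    | some q =>
      obtain ⟨k, s⟩ := q
      simp only [pvBStep]
      by_cases hm : k ∈ d.keys
      · rw [if_pos (by simpa [PySem.Dict.contains_iff_mem_keys] using hm), ih, if_pos hm]
      · rw [if_neg (by simp [PySem.Dict.contains_eq_decide_mem_keys, hm]), ih,
          PySem.Dict.keys_insert_of_not_contains _ _ (by simp [PySem.Dict.contains_eq_decide_mem_keys, hm]), if_neg hm]
theorem pvEnumerate_append {α : Type} (ts : List α) (t : α) (s : Int) :
    PySem.List.enumerate (ts ++ [t]) s = PySem.List.enumerate ts s ++ [((s + ts.length : Int), t)] := by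
  induction ts generalizing s with
  | nil => simp [PySem.List.enumerate_nil, PySem.List.enumerate_cons]
  | cons x xs ih =>
    simp only [List.cons_append, PySem.List.enumerate_cons, ih, List.length_cons]
    push_cast
    ring_nf

theorem pvNodup_pvSeen (ts : List (Option (String × String))) (seen : List String)
    (h : seen.Nodup) : (pvSeen seen ts).Nodup := by
  induction ts generalizing seen with
  | nil => exact h
  | cons t ts ih =>
    rw [pvSeen_cons]
    cases t with
    | none => exact ih seen h
    | some q =>
      by_cases hm : q.1 ∈ seen
      · simp only [if_pos hm]; exact ih seen h
      · simp only [if_neg hm]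
        exact ih _ ((List.nodup_append).mpr ⟨h, List.nodup_singleton _, fun a ha b hb => by simp at hb; exact fun he => hm (hb ▸ he ▸ ha)⟩)

theorem pvMem_pvSeen (ts : List (Option (String × String))) (seen : List String) (k : String)
    (h : k ∈ pvSeen seen ts) : k ∈ seen ∨ k ∈ keysOf ts := by
  induction ts generalizing seen with
  | nil => exact Or.inl h
  | cons t ts ih =>
    rw [pvSeen_cons] at h
    cases t with
    | none => exact (ih _ h).imp id (by simp [keysOf])
    | some q =>
      by_cases hm : q.1 ∈ seen
      · simp only [if_pos hm] at h
        exact (ih _ h).imp id (by simp [keysOf]; tauto)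
      · simp only [if_neg hm] at h
        rcases ih _ h with hs | hk
        · rcases List.mem_append.mp hs with h1 | h2
          · exact Or.inl h1
          · simp at h2; subst h2; right; simp [keysOf]
        · right; simp [keysOf] at hk ⊢; tauto
theorem pvKeysOf_append (ts ts' : List (Option (String × String))) :
    keysOf (ts ++ ts') = keysOf ts ++ keysOf ts' := by
  simp [keysOf, List.filterMap_append]

theorem pvLastValFrom_append (v0 : String) (ls : List String) (x k : String) :
    pvLastValFrom v0 (ls ++ [x]) k =
      match pvTag x with
      | some q => if q.1 = k then pvParse x q.2 else pvLastValFrom v0 ls k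
      | none => pvLastValFrom v0 ls k := by
  simp only [pvLastValFrom, List.foldl_append, List.foldl_cons, List.foldl_nil]

theorem pvBStep_none (lines : List String) (last : PySem.Dict String Int) (d : PySem.Dict String String) :
    pvBStep lines last d none = d := rfl

theorem pvBStep_some (lines : List String) (last : PySem.Dict String Int)
    (d : PySem.Dict String String) (k s : String) :
    pvBStep lines last d (some (k, s)) =
      if d.contains k then d
      else d.insert k (pvParse (PySem.List.pyGetD lines (last.getD k 0) "") s) := rfl

theorem pvGetD_foldB (ts : List (Option (String × String))) (d : PySem.Dict String String)
    (lines : List String) (last : PySem.Dict String Int) (k : String)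
    (hw : ∀ t ∈ ts, ∀ q, t = some q → q.2 = pvSepOf q.1) :
    (ts.foldl (pvBStep lines last) d).getD k "" =
      if d.contains k then d.getD k ""
      else if k ∈ keysOf ts then
        pvParse (PySem.List.pyGetD lines (last.getD k 0) "") (pvSepOf k)
      else d.getD k "" := by
  induction ts generalizing d with
  | nil => simp [keysOf]
  | cons t ts ih =>
    have hw' : ∀ t ∈ ts, ∀ q, t = some q → q.2 = pvSepOf q.1 := fun t ht => hw t (List.mem_cons_of_mem _ ht)
    cases t with
    | none =>
      rw [List.foldl_cons, pvBStep_none]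
      simpa [keysOf] using ih d hw'
    | some q =>
      obtain ⟨k', s⟩ := q
      have hs : s = pvSepOf k' := by
        simpa using hw (some (k', s)) (List.mem_cons_self) (k', s) rfl
      have hkeys : keysOf (some (k', s) :: ts) = k' :: keysOf ts := by simp [keysOf]
      rw [List.foldl_cons, hkeys, pvBStep_some]
      by_cases hc : d.contains k = true
      · by_cases he : k = k'
        · subst he
          rw [if_pos hc, if_pos hc, ih d hw']
          simp [hc]
        · by_cases hc' : d.contains k' = true
          · rw [if_pos hc', ih d hw']
            simp [hc]
          · rw [if_neg hc', ih _ hw',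
              if_pos (by simp [PySem.Dict.contains_insert, hc]),
              PySem.Dict.getD_insert_of_ne _ _ _ he, if_pos hc]
      · by_cases he : k = k'
        · subst he
          rw [if_neg hc, if_neg hc]
          simp only [List.mem_cons, true_or]
          rw [ih _ hw',
            if_pos (by simp),
            PySem.Dict.getD_insert_self, hs]
          simp
        · rw [if_neg hc]
          by_cases hc' : d.contains k' = true
          · rw [if_pos hc', ih d hw']
            simp [hc, he]
          · rw [if_neg hc', ih _ hw',
              if_neg (by simp [PySem.Dict.contains_insert, he, hc]),
              PySem.Dict.getD_insert_of_ne _ _ _ he]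
            simp [he]
theorem pvLastDict_append_none (ts : List (Option (String × String))) (ht : PySem.List.enumerate (ts ++ [none]) 0 = PySem.List.enumerate ts 0 ++ [((0 + ts.length : Int), none)]) :
    pvLastDict (ts ++ [none]) = pvLastDict ts := by
  simp only [pvLastDict, ht, List.foldl_append, List.foldl_cons, List.foldl_nil]

theorem pvLastDict_append_some (ts : List (Option (String × String))) (k s : String) :
    pvLastDict (ts ++ [some (k, s)]) = (pvLastDict ts).insert k (ts.length : Int) := by
  simp only [pvLastDict, pvEnumerate_append, List.foldl_append, List.foldl_cons, List.foldl_nil,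
    zero_add]

theorem pvLast_spec (ls : List String) (k : String) (h : k ∈ keysOf (ls.map pvTag)) :
    ∃ j : Nat, (pvLastDict (ls.map pvTag)).getD k 0 = (j : Int) ∧ j < ls.length ∧
      pvParse (ls.getD j "") (pvSepOf k) = pvLastValFrom "" ls k := by
  induction ls using List.reverseRecOn with
  | nil => simp [keysOf] at h
  | append_singleton ls x ih =>
    rw [List.map_append] at h ⊢
    rw [pvLastValFrom_append]
    cases ht : pvTag x with
    | none =>
      rw [List.map_singleton, ht] at h ⊢
      rw [pvLastDict_append_none _ (pvEnumerate_append _ _ _)]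
      rw [pvKeysOf_append] at h
      have hk : k ∈ keysOf (ls.map pvTag) := by simpa [keysOf] using h
      obtain ⟨j, h1, h2, h3⟩ := ih hk
      exact ⟨j, h1, by simp; omega, by rw [List.getD_append _ _ _ _ (by omega)]; exact h3⟩
    | some q =>
      obtain ⟨k', s'⟩ := q
      have hs' : s' = pvSepOf k' := pvTag_sep x (k', s') ht
      rw [List.map_singleton, ht] at h ⊢
      rw [pvLastDict_append_some]
      by_cases he : k = k'
      · subst he
        refine ⟨ls.length, ?_, by simp, ?_⟩
        · rw [PySem.Dict.getD_insert_self]; simp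
        · have hx : (ls ++ [x]).getD ls.length "" = x := by
            simp [List.getD_eq_getElem?_getD]
          rw [hx]
          simp [hs']
      · rw [pvKeysOf_append] at h
        have hk : k ∈ keysOf (ls.map pvTag) := by
          rcases List.mem_append.mp h with h1 | h2
          · exact h1
          · exfalso; simp [keysOf] at h2; exact he h2
        obtain ⟨j, h1, h2, h3⟩ := ih hk
        refine ⟨j, ?_, by simp; omega, ?_⟩
        · rw [PySem.Dict.getD_insert_of_ne _ _ _ he]; exact h1
        · rw [List.getD_append _ _ _ _ (by omega)]
          have hne : ¬ k' = k := fun hh => he hh.symm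
          simpa [hne] using h3
theorem pvMain (ls : List String) :
    (ls.foldl pvALine PySem.Dict.empty).items =
      ((ls.map pvTag).foldl (pvBStep ls (pvLastDict (ls.map pvTag))) PySem.Dict.empty).items := by
  have hA : ls.foldl pvALine PySem.Dict.empty = ls.foldl pvStepC PySem.Dict.empty := by
    have h : pvALine = pvStepC := funext fun d => funext fun l => pvALine_eq d l
    rw [h]
  rw [hA]
  have hw : ∀ t ∈ ls.map pvTag, ∀ q, t = some q → q.2 = pvSepOf q.1 := by
    intro t ht q hq
    obtain ⟨l, _, rfl⟩ := List.mem_map.mp ht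
    exact pvTag_sep l q hq
  have hkC : (ls.foldl pvStepC PySem.Dict.empty).keys = pvSeen [] (ls.map pvTag) := by
    rw [pvKeys_foldC, PySem.Dict.keys_empty]
  have hkB : ((ls.map pvTag).foldl (pvBStep ls (pvLastDict (ls.map pvTag))) PySem.Dict.empty).keys
      = pvSeen [] (ls.map pvTag) := by
    rw [pvKeys_foldB, PySem.Dict.keys_empty]
  have hnd : (pvSeen [] (ls.map pvTag)).Nodup := pvNodup_pvSeen _ _ List.nodup_nil
  rw [PySem.Dict.items_eq_map_keys _ (hkC ▸ hnd) "", PySem.Dict.items_eq_map_keys _ (hkB ▸ hnd) "",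
    hkC, hkB]
  apply List.map_congr_left
  intro k hk
  have hk2 : k ∈ keysOf (ls.map pvTag) := by
    rcases pvMem_pvSeen _ _ _ hk with h1 | h2
    · simp at h1
    · exact h2
  obtain ⟨j, hj1, hj2, hj3⟩ := pvLast_spec ls k hk2
  rw [pvGetD_foldC, PySem.Dict.getD_empty,
    pvGetD_foldB _ _ _ _ _ hw, hj1]
  simp only [PySem.Dict.contains_empty, Bool.false_eq_true, if_false, if_pos hk2,
    PySem.List.pyGetD_natCast]
  rw [hj3]

-- ===== VERDICT =====
theorem extract_price_data_from_caption_spec : Claim_equal_extract_price_data_from_caption := by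
  intro caption _
  unfold Spec_extract_price_data_from_caption extract_price_data_from_caption extract_price_data_from_caption_alt
  cases caption with
  | none => rfl
  | some c =>
    by_cases h : c = ""
    · simp [h]
    · simp only [h, ite_false]
      exact congrArg some (pvMain _)
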